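-- pv_equiv track=rewrite | github.com/BlinTeam/python_tasks | 2. Стандартные средства языка Python/2.1.2.py | check_exception_order
-- ===== SOURCE A (Python) =====
-- def check_exception_order(cl_tree, ex_seq):
--     ex_order = [ex_seq.pop(0)]
--     useless_ex = []
--
--     for query in ex_seq:
--         if query in ex_order or check_parent(cl_tree, query, ex_order):
--             useless_ex.append(query)
--         ex_order.append(query)
--
--     return useless_ex
--
-- def check_parent(cl_tree, node_a, nodes_list):
--     for node_b in nodes_list:
--         if is_parent(cl_tree, node_a, node_b):
--             return True
--     else:
--         return False
--
-- def is_parent(tree, child, parent, path=[]):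
--     path = path + [child]
--
--     if child not in tree:
--         return None
--     if child == parent:
--         return path
--
--     for relation in tree[child]:
--         if relation not in path:
--             newpath = is_parent(tree, relation, parent, path)
--
--             if newpath:
--                 return newpath
--     else:
--         return None
-- ===== SOURCE B (Python) =====
-- # B: precompute each node's reachable-ancestor set once (iterative DFS with a
-- # visited set), then one pass over ex_seq with a seen-set and table lookups.
-- # Note: like A, pops ex_seq[0] (mutates the argument); return value is the claim.
-- def check_exception_order(cl_tree, ex_seq):
--     anc = {}
--     for node in cl_tree:
--         seen = set()
--         stack = [node]
--         while stack:
--             cur = stack.pop()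
--             if cur in seen or cur not in cl_tree:
--                 continue
--             seen.add(cur)
--             stack.extend(cl_tree[cur])
--         anc[node] = seen
--
--     seen_q = {ex_seq.pop(0)}
--     useless = []
--     for q in ex_seq:
--         if q in seen_q or not anc.get(q, set()).isdisjoint(seen_q):
--             useless.append(q)
--         seen_q.add(q)
--     return useless
-- ===== Notes on version B (the rewrite author's own statement) =====
-- stated objective: faster
-- what changed: A re-runs a recursive path-avoiding DFS (is_parent) for every (query, earlier-exception) pair; B precomputes each class's reachable-ancestor set once with an iterative visited-set DFS and then does a single pass over ex_seq with a seen set and set-intersection lookups.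
import Mathlib
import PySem

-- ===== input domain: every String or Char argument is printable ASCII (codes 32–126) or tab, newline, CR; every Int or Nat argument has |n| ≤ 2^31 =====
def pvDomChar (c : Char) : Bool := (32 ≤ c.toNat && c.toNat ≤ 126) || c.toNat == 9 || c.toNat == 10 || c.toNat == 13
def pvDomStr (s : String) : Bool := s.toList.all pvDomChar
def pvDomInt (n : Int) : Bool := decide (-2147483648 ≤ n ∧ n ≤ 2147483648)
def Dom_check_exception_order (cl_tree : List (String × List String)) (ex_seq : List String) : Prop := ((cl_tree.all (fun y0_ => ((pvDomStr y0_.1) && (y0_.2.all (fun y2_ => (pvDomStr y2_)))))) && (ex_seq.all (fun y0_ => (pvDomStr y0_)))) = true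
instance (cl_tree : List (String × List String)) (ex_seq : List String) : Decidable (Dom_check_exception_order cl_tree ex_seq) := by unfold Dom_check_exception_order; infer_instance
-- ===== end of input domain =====

-- B replaces A's per-query recursive subclass search by one precomputed reachability
-- table (iterative DFS with a visited set per class) plus a single seen-set pass.
-- Both A and B pop ex_seq[0] in Python (argument mutation); the claim is about the return value.

-- ===== PORT A =====
-- Python truthiness of is_parent's result: None is falsy, a (path) list is truthy iff nonempty.
def pyTruthy (o : Option (List String)) : Bool :=
  match o with
  | none => false
  | some l => !l.isEmpty

mutual
-- is_parent(tree, child, parent, path); fuel only guards termination (proven sufficient below)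
def is_parentA (d : PySem.Dict String (List String)) (fuel : Nat) (child parent : String)
    (path : List String) : Option (List String) :=
  match fuel with
  | 0 => none
  | f + 1 =>
    let path2 := path ++ [child]
    if !(d.contains child) then none
    else if child = parent then some path2
    else relLoopA d f (d.getD child []) parent path2
termination_by (fuel, 0)

-- the 'for relation in tree[child]' loop of is_parent
def relLoopA (d : PySem.Dict String (List String)) (f : Nat) (rels : List String)
    (parent : String) (path2 : List String) : Option (List String) :=
  match rels with
  | [] => none
  | r :: rs =>
    if !(path2.contains r) then
      let np := is_parentA d f r parent path2
      if pyTruthy np then np else relLoopA d f rs parent path2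
    else relLoopA d f rs parent path2
termination_by (f, rels.length + 1)
end

-- check_parent(cl_tree, node_a, nodes_list)
def check_parentA (d : PySem.Dict String (List String)) (fuel : Nat) (node_a : String)
    (nodes_list : List String) : Bool :=
  match nodes_list with
  | [] => false
  | b :: bs =>
    if pyTruthy (is_parentA d fuel node_a b []) then true else check_parentA d fuel node_a bs

-- the 'for query in ex_seq' loop of A
def mainLoopA (d : PySem.Dict String (List String)) (fuel : Nat)
    (ex_order useless : List String) (qs : List String) : List String :=
  match qs with
  | [] => useless
  | q :: rest =>
    let useless2 :=
      if ex_order.contains q || check_parentA d fuel q ex_order then useless ++ [q] else useless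
    mainLoopA d fuel (ex_order ++ [q]) useless2 rest

def check_exception_order (cl_tree : List (String × List String)) (ex_seq : List String) : List String :=
  match ex_seq with
  | [] => []  -- Python raises IndexError on ex_seq.pop(0); excluded by Pre_
  | h :: rest =>
    let d := PySem.Dict.ofList cl_tree
    mainLoopA d (cl_tree.length + 1) [h] [] rest

-- ===== PORT B =====
-- lemma cited by dfsB's decreasing_by (termination of Source B's while loop)
theorem pv_countP_lt {α : Type} (l : List α) (p p' : α → Bool)
    (h : ∀ x ∈ l, p' x = true → p x = true) (c : α) (hc : c ∈ l)
    (h1 : p c = true) (h2 : p' c = false) : l.countP p' < l.countP p := by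
  induction l with
  | nil => cases hc
  | cons a t ih =>
    have e1 : (a :: t).countP p' = t.countP p' + if p' a = true then 1 else 0 := List.countP_cons
    have e2 : (a :: t).countP p = t.countP p + if p a = true then 1 else 0 := List.countP_cons
    rcases List.mem_cons.mp hc with rfl | hct
    · have hle : t.countP p' ≤ t.countP p :=
        List.countP_mono_left (fun x hx => h x (List.mem_cons_of_mem _ hx))
      have e1' : (c :: t).countP p' = t.countP p' := by rw [e1, h2]; simp
      have e2' : (c :: t).countP p = t.countP p + 1 := by rw [e2, h1]; simp
      omega
    · have hlt := ih (fun x hx hpx => h x (List.mem_cons_of_mem _ hx) hpx) hct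
      have hab : (if p' a = true then 1 else 0) ≤ (if p a = true then 1 else 0) := by
        by_cases hpa : p' a = true
        · simp [hpa, h a List.mem_cons_self hpa]
        · simp [hpa]
      omega

-- Source B's per-node 'while stack' DFS; Lean's stack holds Python's stack reversed
-- (head = top), so Python's pop()/extend(rels) is head-match / rels.reverse ++ rest — exact.
def dfsB (d : PySem.Dict String (List String)) (stack : List String)
    (seen : PySem.Set String) : PySem.Set String :=
  match stack with
  | [] => seen
  | cur :: rest =>
    if PySem.Set.contains seen cur || !(d.contains cur) then dfsB d rest seen
    else dfsB d ((d.getD cur []).reverse ++ rest) (PySem.Set.add seen cur)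
termination_by ((d.keys.countP (fun k => !(PySem.Set.contains seen k))), stack.length)
decreasing_by
  · apply Prod.Lex.right
    simp
  · apply Prod.Lex.left
    rename_i hcond
    simp only [Bool.or_eq_true, Bool.not_eq_true', not_or, Bool.not_eq_false] at hcond
    obtain ⟨hns, hk⟩ := hcond
    refine pv_countP_lt _ _ _ ?_ cur ?_ ?_ ?_
    · intro x _ hpx
      simp only [Bool.not_eq_true'] at hpx ⊢
      by_contra hx
      simp only [Bool.not_eq_false, PySem.Set.contains_iff] at hx
      have : x ∈ PySem.Set.add seen cur := (PySem.Set.mem_add _ _ _).mpr (Or.inl hx)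
      rw [(PySem.Set.contains_iff _ _).mpr this] at hpx
      cases hpx
    · exact (PySem.Dict.contains_iff_mem_keys _ _).mp hk
    · simpa [PySem.Set.contains_iff] using hns
    · simp [PySem.Set.mem_add]

-- anc = {node: reachable-set(node) for node in cl_tree}
def ancTableB (cl_tree : List (String × List String)) (d : PySem.Dict String (List String)) :
    PySem.Dict String (PySem.Set String) :=
  cl_tree.foldl (fun a p => a.insert p.1 (dfsB d [p.1] PySem.Set.empty)) PySem.Dict.empty

-- the 'for q in ex_seq' pass of B
def mainLoopB (anc : PySem.Dict String (PySem.Set String)) (seenq : PySem.Set String)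
    (useless : List String) (qs : List String) : List String :=
  match qs with
  | [] => useless
  | q :: rest =>
    let u2 :=
      if PySem.Set.contains seenq q
          || !(PySem.Set.isdisjoint (anc.getD q PySem.Set.empty) seenq) then
        useless ++ [q]
      else useless
    mainLoopB anc (PySem.Set.add seenq q) u2 rest

def check_exception_order_alt (cl_tree : List (String × List String)) (ex_seq : List String) : List String :=
  match ex_seq with
  | [] => []  -- Python raises IndexError on ex_seq.pop(0); excluded by Pre_
  | h :: rest =>
    let d := PySem.Dict.ofList cl_tree
    let anc := ancTableB cl_tree d
    mainLoopB anc (PySem.Set.add PySem.Set.empty h) [] rest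

-- ===== PRECONDITION & SPEC =====
-- Pre_ excludes only the empty ex_seq, on which A's ex_seq.pop(0) raises IndexError.
def Pre_check_exception_order (_cl_tree : List (String × List String)) (ex_seq : List String) : Prop :=
  ex_seq ≠ []
instance (cl_tree : List (String × List String)) (ex_seq : List String) : Decidable (Pre_check_exception_order cl_tree ex_seq) := by unfold Pre_check_exception_order; infer_instance

def pvWitness_check_exception_order : (List (String × List String)) × List String :=
  ([("ValueError", ["Exception"]), ("Exception", [])], ["Exception", "ValueError"])

def Spec_check_exception_order (cl_tree : List (String × List String)) (ex_seq : List String) (out : List String) : Prop := out = check_exception_order_alt cl_tree ex_seq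
instance (cl_tree : List (String × List String)) (ex_seq : List String) (out : List String) : Decidable (Spec_check_exception_order cl_tree ex_seq out) := by unfold Spec_check_exception_order; infer_instance

-- ===== CLAIM (what is proved, stated in full; the proofs are below) =====
def Claim_equal_check_exception_order : Prop := ∀ (cl_tree : List (String × List String)) (ex_seq : List String), Dom_check_exception_order cl_tree ex_seq → Pre_check_exception_order cl_tree ex_seq → Spec_check_exception_order cl_tree ex_seq (check_exception_order cl_tree ex_seq)

-- ===== LEMMAS AND PROOFS =====

-- Reachability through keys of the class tree: A's is_parent searches for it
-- path-avoidingly, B's dfsB computes its image as a set.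
inductive PvReach (d : PySem.Dict String (List String)) : String → String → Prop
  | refl (c : String) : d.contains c = true → PvReach d c c
  | step (c r p : String) : d.contains c = true → r ∈ d.getD c [] → PvReach d r p → PvReach d c p

theorem pvReach_contains {d : PySem.Dict String (List String)} {c p : String}
    (h : PvReach d c p) : d.contains c = true := by cases h <;> assumption

theorem pvReach_snoc {d : PySem.Dict String (List String)} {a b r : String}
    (h : PvReach d a b) (hr : r ∈ d.getD b []) (hc : d.contains r = true) :
    PvReach d a r := by
  induction h with
  | refl c hcc => exact PvReach.step c r r hcc hr (PvReach.refl r hc)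
  | step c r' p hcc hr' _ ih => exact PvReach.step c r' r hcc hr' (ih hr)

-- explicit walks: node sequence c :: vs, all keys, last node = p
def pvWalk (d : PySem.Dict String (List String)) (c : String) (vs : List String) (p : String) : Prop :=
  match vs with
  | [] => d.contains c = true ∧ c = p
  | r :: rs => d.contains c = true ∧ r ∈ d.getD c [] ∧ pvWalk d r rs p

theorem pvReach_iff_walk {d : PySem.Dict String (List String)} {c p : String} :
    PvReach d c p ↔ ∃ vs, pvWalk d c vs p := by
  constructor
  · intro h
    induction h with
    | refl c hcc => exact ⟨[], hcc, rfl⟩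
    | step c r p hcc hr _ ih =>
      obtain ⟨vs, hw⟩ := ih
      exact ⟨r :: vs, hcc, hr, hw⟩
  · rintro ⟨vs, hw⟩
    induction vs generalizing c with
    | nil => obtain ⟨hcc, rfl⟩ := hw; exact PvReach.refl c hcc
    | cons r rs ih =>
      obtain ⟨hcc, hr, hwr⟩ := hw
      exact PvReach.step c r p hcc hr (ih hwr)

theorem pvWalk_suffix {d : PySem.Dict String (List String)} {p x : String} :
    ∀ (l1 : List String) (c : String) {l2 : List String},
      pvWalk d c (l1 ++ x :: l2) p → pvWalk d x l2 p := by
  intro l1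
  induction l1 with
  | nil =>
    intro c l2 h
    rw [List.nil_append] at h
    exact h.2.2
  | cons a t ih =>
    intro c l2 h
    rw [List.cons_append] at h
    exact ih a h.2.2

-- every walk shortens to a duplicate-free walk over a subset of its nodes
theorem pvWalk_nodup {d : PySem.Dict String (List String)} {p : String} :
    ∀ (n : Nat) (c : String) (vs : List String), vs.length ≤ n → pvWalk d c vs p →
      ∃ vs', pvWalk d c vs' p ∧ (c :: vs').Nodup ∧ ∀ x ∈ vs', x ∈ vs := by
  intro n
  induction n with
  | zero =>
    intro c vs hlen hw
    have hnil : vs = [] := List.eq_nil_of_length_eq_zero (Nat.le_zero.mp hlen)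
    subst hnil
    exact ⟨[], hw, List.nodup_singleton c, by simp⟩
  | succ n ih =>
    intro c vs hlen hw
    by_cases hcv : c ∈ vs
    · obtain ⟨l1, l2, rfl⟩ := List.append_of_mem hcv
      have hw2 : pvWalk d c l2 p := pvWalk_suffix l1 c hw
      have hl2 : l2.length ≤ n := by
        simp only [List.length_append, List.length_cons] at hlen; omega
      obtain ⟨vs', h1, h2, h3⟩ := ih c l2 hl2 hw2
      exact ⟨vs', h1, h2, fun x hx => by
        have := h3 x hx; simp only [List.mem_append, List.mem_cons]; tauto⟩
    · cases vs with
      | nil => exact ⟨[], hw, List.nodup_singleton c, by simp⟩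
      | cons r rs =>
        obtain ⟨hcc, hr, hwr⟩ := hw
        obtain ⟨vs', h1, h2, h3⟩ := ih r rs (by simp at hlen; omega) hwr
        refine ⟨r :: vs', ⟨hcc, hr, h1⟩, ?_, ?_⟩
        · refine List.nodup_cons.mpr ⟨?_, h2⟩
          intro hmem
          rcases List.mem_cons.mp hmem with rfl | hv
          · exact hcv List.mem_cons_self
          · exact hcv (List.mem_cons_of_mem _ (h3 c hv))
        · intro x hx
          rcases List.mem_cons.mp hx with rfl | hv
          · exact List.mem_cons_self
          · exact List.mem_cons_of_mem _ (h3 x hv)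

-- A's path-avoiding search as a relation: PvRA d avoid c p holds iff is_parent
-- (with accumulated path 'avoid') can reach p from c
inductive PvRA (d : PySem.Dict String (List String)) : List String → String → String → Prop
  | found (avoid : List String) (c : String) : d.contains c = true → PvRA d avoid c c
  | step (avoid : List String) (c r p : String) : d.contains c = true → r ∈ d.getD c [] →
      r ∉ avoid ++ [c] → PvRA d (avoid ++ [c]) r p → PvRA d avoid c p

theorem pvRA_reach {d : PySem.Dict String (List String)} {avoid : List String} {c p : String}
    (h : PvRA d avoid c p) : PvReach d c p := by
  induction h with
  | found avoid c hcc => exact PvReach.refl c hcc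
  | step avoid c r p hcc hr _ _ ih => exact PvReach.step c r p hcc hr ih

theorem pvWalk_RA {d : PySem.Dict String (List String)} {p : String} :
    ∀ (vs : List String) (c : String) (avoid : List String), pvWalk d c vs p →
      (c :: vs).Nodup → (∀ x ∈ c :: vs, x ∉ avoid) → PvRA d avoid c p := by
  intro vs
  induction vs with
  | nil =>
    intro c avoid hw _ _
    obtain ⟨hcc, rfl⟩ := hw
    exact PvRA.found avoid c hcc
  | cons r rs ih =>
    intro c avoid hw hnd hav
    obtain ⟨hcc, hr, hwr⟩ := hw
    have hcnotin : c ∉ r :: rs := (List.nodup_cons.mp hnd).1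
    refine PvRA.step avoid c r p hcc hr ?_ ?_
    · intro hmem
      rcases List.mem_append.mp hmem with h1 | h1
      · exact hav r (List.mem_cons_of_mem _ List.mem_cons_self) h1
      · have hrc : r = c := List.mem_singleton.mp h1
        subst hrc
        exact hcnotin List.mem_cons_self
    · refine ih r (avoid ++ [c]) hwr (List.nodup_cons.mp hnd).2 ?_
      intro x hx hmem
      rcases List.mem_append.mp hmem with h1 | h1
      · exact hav x (List.mem_cons_of_mem _ hx) h1
      · rw [List.mem_singleton.mp h1] at hx
        exact hcnotin hx

theorem pv_keys_ofList (cl_tree : List (String × List String)) :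
    (PySem.Dict.ofList cl_tree).keys = PySem.Set.ofList (cl_tree.map Prod.fst) := by
  show (List.foldl (fun acc p => acc.insert p.1 p.2) PySem.Dict.empty cl_tree).keys = _
  rw [show (fun (acc : PySem.Dict String (List String)) (p : String × List String) =>
        acc.insert p.1 p.2) = (fun d x => d.insert (Prod.fst x)
          ((fun (_ : PySem.Dict String (List String)) (x : String × List String) => x.2) d x))
        from rfl,
      PySem.Dict.keys_foldl_insert_key, PySem.Dict.keys_empty, PySem.Set.update_nil_left]

theorem pv_relLoop_iff (d : PySem.Dict String (List String)) (f : Nat) (p : String) :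
    ∀ (rels : List String) (path : List String),
      pyTruthy (relLoopA d f rels p path) = true ↔
        ∃ r ∈ rels, r ∉ path ∧ pyTruthy (is_parentA d f r p path) = true := by
  intro rels path
  induction rels with
  | nil => simp [relLoopA, pyTruthy]
  | cons r rs ih =>
    rw [relLoopA]
    by_cases hmem : r ∈ path
    · have hb : path.contains r = true := List.contains_iff_mem.mpr hmem
      rw [hb]
      rw [if_neg (by simp)]
      rw [ih]
      constructor
      · rintro ⟨r', hr', hn, ht⟩; exact ⟨r', List.mem_cons_of_mem _ hr', hn, ht⟩
      · rintro ⟨r', hr', hn, ht⟩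
        rcases List.mem_cons.mp hr' with rfl | htl
        · exact absurd hmem hn
        · exact ⟨r', htl, hn, ht⟩
    · have hb : path.contains r = false := by
        rw [Bool.eq_false_iff]; intro hh; exact hmem (List.contains_iff_mem.mp hh)
      rw [hb]
      rw [if_pos (by simp)]
      cases hT : pyTruthy (is_parentA d f r p path) with
      | true =>
        rw [if_pos hT]
        constructor
        · intro _; exact ⟨r, List.mem_cons_self, hmem, hT⟩
        · intro _; exact hT
      | false =>
        rw [if_neg (by simp [hT])]
        rw [ih]
        constructor
        · rintro ⟨r', hr', hn, ht⟩; exact ⟨r', List.mem_cons_of_mem _ hr', hn, ht⟩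
        · rintro ⟨r', hr', hn, ht⟩
          rcases List.mem_cons.mp hr' with rfl | htl
          · rw [hT] at ht; cases ht
          · exact ⟨r', htl, hn, ht⟩

theorem pv_isParent_RA (d : PySem.Dict String (List String)) (p : String) :
    ∀ (f : Nat) (c : String) (path : List String),
      pyTruthy (is_parentA d f c p path) = true → PvRA d path c p := by
  intro f
  induction f with
  | zero => intro c path h; simp [is_parentA, pyTruthy] at h
  | succ f ih =>
    intro c path h
    rw [is_parentA] at h
    by_cases hc : d.contains c = true
    · rw [hc] at h
      rw [if_neg (by simp)] at h
      by_cases hcp : c = p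
      · subst hcp; exact PvRA.found path c hc
      · rw [if_neg hcp] at h
        obtain ⟨r, hr, hnp, ht⟩ := (pv_relLoop_iff d f p _ _).mp h
        exact PvRA.step path c r p hc hr hnp (ih r (path ++ [c]) ht)
    · rw [Bool.not_eq_true] at hc
      rw [hc] at h
      rw [if_pos (by simp)] at h
      simp [pyTruthy] at h

theorem pv_RA_isParent (d : PySem.Dict String (List String)) {p : String} :
    ∀ {avoid : List String} {c : String}, PvRA d avoid c p → avoid.Nodup → c ∉ avoid →
      (∀ x ∈ avoid, x ∈ d.keys) →
      ∀ f : Nat, d.keys.length + 1 ≤ f + avoid.length →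
      pyTruthy (is_parentA d f c p avoid) = true := by
  have hlen : ∀ (avoid : List String) (c : String), avoid.Nodup → c ∉ avoid →
      (∀ x ∈ avoid, x ∈ d.keys) → d.contains c = true →
      avoid.length + 1 ≤ d.keys.length := by
    intro avoid c hnd hcnot hsub hcc
    have hnd2 : (avoid ++ [c]).Nodup := by
      rw [List.nodup_append_comm]
      exact List.nodup_cons.mpr ⟨hcnot, hnd⟩
    have hsub2 : (avoid ++ [c]) ⊆ d.keys := by
      intro x hx
      rcases List.mem_append.mp hx with h1 | h1
      · exact hsub x h1
      · rw [List.mem_singleton.mp h1]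
        exact (PySem.Dict.contains_iff_mem_keys _ _).mp hcc
    have := (List.subperm_of_subset hnd2 hsub2).length_le
    simpa using this
  intro avoid c h
  induction h with
  | found avoid c hcc =>
    intro hnd hcnot hsub f hf
    have := hlen avoid c hnd hcnot hsub hcc
    obtain ⟨f', rfl⟩ : ∃ f', f = f' + 1 := ⟨f - 1, by omega⟩
    rw [is_parentA, hcc]
    rw [if_neg (by simp)]
    rw [if_pos rfl]
    simp [pyTruthy]
  | step avoid c r p hcc hr hrn _ ih =>
    intro hnd hcnot hsub f hf
    have := hlen avoid c hnd hcnot hsub hcc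
    obtain ⟨f', rfl⟩ : ∃ f', f = f' + 1 := ⟨f - 1, by omega⟩
    rw [is_parentA, hcc]
    rw [if_neg (by simp)]
    by_cases hcp : c = p
    · rw [if_pos hcp]; simp [pyTruthy]
    · rw [if_neg hcp]
      apply (pv_relLoop_iff d f' p _ _).mpr
      refine ⟨r, hr, hrn, ?_⟩
      apply ih
      · rw [List.nodup_append_comm]
        exact List.nodup_cons.mpr ⟨hcnot, hnd⟩
      · exact hrn
      · intro x hx
        rcases List.mem_append.mp hx with h1 | h1
        · exact hsub x h1
        · rw [List.mem_singleton.mp h1]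
          exact (PySem.Dict.contains_iff_mem_keys _ _).mp hcc
      · simp only [List.length_append, List.length_singleton]
        omega

-- the two ends: fuel cl_tree.length + 1 decides PvReach
theorem pv_isParent_iff_reach (cl_tree : List (String × List String)) (c p : String) :
    pyTruthy (is_parentA (PySem.Dict.ofList cl_tree) (cl_tree.length + 1) c p []) = true ↔
      PvReach (PySem.Dict.ofList cl_tree) c p := by
  constructor
  · intro h
    exact pvRA_reach (pv_isParent_RA _ p _ c [] h)
  · intro h
    obtain ⟨vs, hw⟩ := pvReach_iff_walk.mp h
    obtain ⟨vs', h1, h2, _⟩ := pvWalk_nodup vs.length c vs le_rfl hw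
    have hra := pvWalk_RA vs' c [] h1 h2 (by simp)
    apply pv_RA_isParent _ hra List.nodup_nil (by simp) (by simp)
    have hk : (PySem.Dict.ofList cl_tree).keys.length ≤ cl_tree.length := by
      rw [pv_keys_ofList]
      calc (PySem.Set.ofList (cl_tree.map Prod.fst)).length
          ≤ (cl_tree.map Prod.fst).length := PySem.Set.length_ofList_le _
        _ = cl_tree.length := List.length_map _
    simp only [List.length_nil]
    omega

theorem pv_checkParent_iff (d : PySem.Dict String (List String)) (f : Nat) (q : String) :
    ∀ S : List String, check_parentA d f q S = true ↔
      ∃ b ∈ S, pyTruthy (is_parentA d f q b []) = true := by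
  intro S
  induction S with
  | nil => simp [check_parentA]
  | cons b bs ih =>
    rw [check_parentA]
    by_cases hT : pyTruthy (is_parentA d f q b []) = true
    · rw [if_pos hT]
      constructor
      · intro _; exact ⟨b, List.mem_cons_self, hT⟩
      · intro _; rfl
    · rw [if_neg hT, ih]
      constructor
      · rintro ⟨b', hb', ht⟩; exact ⟨b', List.mem_cons_of_mem _ hb', ht⟩
      · rintro ⟨b', hb', ht⟩
        rcases List.mem_cons.mp hb' with rfl | htl
        · exact absurd ht hT
        · exact ⟨b', htl, ht⟩

-- dfsB: soundness, monotonicity, closure, completeness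
theorem pv_dfsB_mono (d : PySem.Dict String (List String)) :
    ∀ (stack : List String) (seen : PySem.Set String) (x : String),
      x ∈ seen → x ∈ dfsB d stack seen := by
  intro stack seen
  fun_induction dfsB d stack seen with
  | case1 seen => exact fun x hx => hx
  | case2 seen cur rest hcond ih => exact fun x hx => ih x hx
  | case3 seen cur rest hcond ih =>
    intro x hx
    exact ih x ((PySem.Set.mem_add _ _ _).mpr (Or.inl hx))

theorem pv_dfsB_stack (d : PySem.Dict String (List String)) :
    ∀ (stack : List String) (seen : PySem.Set String) (x : String),
      x ∈ stack → d.contains x = true → x ∈ dfsB d stack seen := by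
  intro stack seen
  fun_induction dfsB d stack seen with
  | case1 seen => intro x hx; cases hx
  | case2 seen cur rest hcond ih =>
    intro x hx hcx
    rcases List.mem_cons.mp hx with rfl | htl
    · rcases Bool.or_eq_true_iff.mp hcond with h1 | h1
      · exact pv_dfsB_mono d rest seen x ((PySem.Set.contains_iff _ _).mp h1)
      · rw [Bool.not_eq_true'] at h1; rw [hcx] at h1; cases h1
    · exact ih x htl hcx
  | case3 seen cur rest hcond ih =>
    intro x hx hcx
    rcases List.mem_cons.mp hx with rfl | htl
    · exact pv_dfsB_mono d _ _ x ((PySem.Set.mem_add _ _ _).mpr (Or.inr rfl))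
    · exact ih x (List.mem_append_right _ htl) hcx

theorem pv_dfsB_sound (d : PySem.Dict String (List String)) (q : String) :
    ∀ (stack : List String) (seen : PySem.Set String),
      (∀ y ∈ seen, PvReach d q y) →
      (∀ r ∈ stack, r = q ∨ ∃ c, PvReach d q c ∧ r ∈ d.getD c []) →
      ∀ x ∈ dfsB d stack seen, PvReach d q x := by
  intro stack seen
  fun_induction dfsB d stack seen with
  | case1 seen => intro h1 _ x hx; exact h1 x hx
  | case2 seen cur rest hcond ih =>
    intro h1 h2
    exact ih h1 (fun r hr => h2 r (List.mem_cons_of_mem _ hr))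
  | case3 seen cur rest hcond ih =>
    intro h1 h2
    simp only [Bool.or_eq_true, Bool.not_eq_true', not_or, Bool.not_eq_false] at hcond
    obtain ⟨hns, hk⟩ := hcond
    have hcur : PvReach d q cur := by
      rcases h2 cur List.mem_cons_self with rfl | ⟨c, hc, hrc⟩
      · exact PvReach.refl cur hk
      · exact pvReach_snoc hc hrc hk
    apply ih
    · intro y hy
      rcases (PySem.Set.mem_add _ _ _).mp hy with hy1 | rfl
      · exact h1 y hy1
      · exact hcur
    · intro r hr
      rcases List.mem_append.mp hr with h3 | h3
      · exact Or.inr ⟨cur, hcur, List.mem_reverse.mp h3⟩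
      · exact h2 r (List.mem_cons_of_mem _ h3)

def pvClosed (d : PySem.Dict String (List String)) (stack : List String)
    (seen : PySem.Set String) : Prop :=
  ∀ v ∈ seen, ∀ r ∈ d.getD v [], d.contains r = true → r ∈ seen ∨ r ∈ stack

theorem pv_dfsB_closed (d : PySem.Dict String (List String)) :
    ∀ (stack : List String) (seen : PySem.Set String), pvClosed d stack seen →
      ∀ v ∈ dfsB d stack seen, ∀ r ∈ d.getD v [], d.contains r = true →
        r ∈ dfsB d stack seen := by
  intro stack seen
  fun_induction dfsB d stack seen with
  | case1 seen =>
    intro hcl v hv r hr hcr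
    rcases hcl v hv r hr hcr with h1 | h1
    · exact h1
    · cases h1
  | case2 seen cur rest hcond ih =>
    intro hcl
    apply ih
    intro v hv r hr hcr
    rcases hcl v hv r hr hcr with h1 | h1
    · exact Or.inl h1
    · rcases List.mem_cons.mp h1 with rfl | htl
      · rcases Bool.or_eq_true_iff.mp hcond with h2 | h2
        · exact Or.inl ((PySem.Set.contains_iff _ _).mp h2)
        · rw [Bool.not_eq_true'] at h2; rw [hcr] at h2; cases h2
      · exact Or.inr htl
  | case3 seen cur rest hcond ih =>
    intro hcl
    apply ih
    intro v hv r hr hcr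
    rcases (PySem.Set.mem_add _ _ _).mp hv with hv1 | rfl
    · rcases hcl v hv1 r hr hcr with h1 | h1
      · exact Or.inl ((PySem.Set.mem_add _ _ _).mpr (Or.inl h1))
      · rcases List.mem_cons.mp h1 with rfl | htl
        · exact Or.inl ((PySem.Set.mem_add _ _ _).mpr (Or.inr rfl))
        · exact Or.inr (List.mem_append_right _ htl)
    · exact Or.inr (List.mem_append_left _ (List.mem_reverse.mpr hr))

theorem pvWalk_contains {d : PySem.Dict String (List String)} {c p : String} {vs : List String}
    (h : pvWalk d c vs p) : d.contains c = true := by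
  cases vs with
  | nil => exact h.1
  | cons r rs => exact h.1

theorem pv_dfsB_iff_reach (d : PySem.Dict String (List String)) (q x : String) :
    x ∈ dfsB d [q] PySem.Set.empty ↔ PvReach d q x := by
  constructor
  · intro hx
    refine pv_dfsB_sound d q [q] PySem.Set.empty ?_ ?_ x hx
    · intro y hy; simp [PySem.Set.empty] at hy
    · intro r hr
      exact Or.inl (List.mem_singleton.mp hr)
  · intro h
    have hq : q ∈ dfsB d [q] PySem.Set.empty :=
      pv_dfsB_stack d [q] PySem.Set.empty q List.mem_cons_self (pvReach_contains h)
    have hclosed := pv_dfsB_closed d [q] PySem.Set.empty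
      (by intro v hv; simp [PySem.Set.empty] at hv)
    obtain ⟨vs, hw⟩ := pvReach_iff_walk.mp h
    clear h
    have hgen : ∀ (vs : List String) (c : String), pvWalk d c vs x →
        c ∈ dfsB d [q] PySem.Set.empty → x ∈ dfsB d [q] PySem.Set.empty := by
      intro vs
      induction vs with
      | nil => intro c hww hc; rw [← hww.2]; exact hc
      | cons r rs ih =>
        intro c hww hc
        obtain ⟨hcc, hr, hwr⟩ := hww
        exact ih r hwr (hclosed c hc r hr (pvWalk_contains hwr))
    exact hgen vs q hw hq

-- the anc table looks up exactly the dfs sets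
theorem pv_ancTable_getD (cl_tree : List (String × List String))
    (d : PySem.Dict String (List String)) (q : String) :
    (ancTableB cl_tree d).getD q PySem.Set.empty =
      if q ∈ cl_tree.map Prod.fst then dfsB d [q] PySem.Set.empty else PySem.Set.empty := by
  have hgen : ∀ (l : List (String × List String)) (acc : PySem.Dict String (PySem.Set String)),
      (l.foldl (fun a p => a.insert p.1 (dfsB d [p.1] PySem.Set.empty)) acc).getD q
          PySem.Set.empty =
        if q ∈ l.map Prod.fst then dfsB d [q] PySem.Set.empty
        else acc.getD q PySem.Set.empty := by
    intro l
    induction l with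
    | nil => intro acc; simp
    | cons pr l ih =>
      intro acc
      rw [List.foldl_cons, ih]
      by_cases hq : q ∈ l.map Prod.fst
      · rw [if_pos hq, if_pos (by simp [hq])]
      · rw [if_neg hq, PySem.Dict.getD_insert]
        by_cases hqp : q = pr.1
        · rw [if_pos hqp, if_pos (by simp [hqp]), hqp]
        · rw [if_neg hqp, if_neg (by simp [hqp, hq])]
  unfold ancTableB
  rw [hgen, PySem.Dict.getD_empty]

theorem pv_contains_ofList_mem (cl_tree : List (String × List String)) (c : String) :
    (PySem.Dict.ofList cl_tree).contains c = true ↔ c ∈ cl_tree.map Prod.fst := by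
  rw [PySem.Dict.contains_iff_mem_keys, pv_keys_ofList, PySem.Set.mem_ofList]

theorem pv_anc_mem (cl_tree : List (String × List String)) (q b : String) :
    b ∈ (ancTableB cl_tree (PySem.Dict.ofList cl_tree)).getD q PySem.Set.empty ↔
      PvReach (PySem.Dict.ofList cl_tree) q b := by
  rw [pv_ancTable_getD]
  by_cases hq : q ∈ cl_tree.map Prod.fst
  · rw [if_pos hq]
    exact pv_dfsB_iff_reach _ q b
  · rw [if_neg hq]
    constructor
    · intro h; simp [PySem.Set.empty] at h
    · intro h
      exact absurd ((pv_contains_ofList_mem _ _).mp (pvReach_contains h)) hq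

-- the two main loops agree whenever ex_order and seenq have the same members
theorem pv_mainLoop_eq (cl_tree : List (String × List String)) :
    ∀ (qs ex_order : List String) (seenq : PySem.Set String) (useless : List String),
      (∀ x, x ∈ ex_order ↔ x ∈ seenq) →
      mainLoopA (PySem.Dict.ofList cl_tree) (cl_tree.length + 1) ex_order useless qs =
        mainLoopB (ancTableB cl_tree (PySem.Dict.ofList cl_tree)) seenq useless qs := by
  intro qs
  induction qs with
  | nil => intro ex_order seenq useless _; rfl
  | cons q rest ih =>
    intro ex_order seenq useless hmem
    have hflag : (ex_order.contains q
          || check_parentA (PySem.Dict.ofList cl_tree) (cl_tree.length + 1) q ex_order)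
        = (seenq.contains q
          || !(PySem.Set.isdisjoint
                ((ancTableB cl_tree (PySem.Dict.ofList cl_tree)).getD q PySem.Set.empty)
                seenq)) := by
      rw [Bool.eq_iff_iff]
      simp only [Bool.or_eq_true]
      have e1 : ex_order.contains q = true ↔ seenq.contains q = true := by
        rw [List.contains_iff_mem, PySem.Set.contains_iff]; exact hmem q
      have e2 : check_parentA (PySem.Dict.ofList cl_tree) (cl_tree.length + 1) q ex_order = true
          ↔ (!(PySem.Set.isdisjoint
              ((ancTableB cl_tree (PySem.Dict.ofList cl_tree)).getD q PySem.Set.empty)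
              seenq)) = true := by
        rw [pv_checkParent_iff, Bool.not_eq_true']
        constructor
        · rintro ⟨b, hb, ht⟩
          have hreach := (pv_isParent_iff_reach cl_tree q b).mp ht
          rw [Bool.eq_false_iff]
          intro hdis
          exact (PySem.Set.isdisjoint_iff _ _).mp hdis b
            ((pv_anc_mem cl_tree q b).mpr hreach) ((hmem b).mp hb)
        · intro hdis
          have hne : ¬ (∀ x ∈ (ancTableB cl_tree (PySem.Dict.ofList cl_tree)).getD q
              PySem.Set.empty, x ∉ seenq) := by
            intro hall
            rw [(PySem.Set.isdisjoint_iff _ _).mpr hall] at hdis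
            cases hdis
          push Not at hne
          obtain ⟨b, hbanc, hbs⟩ := hne
          exact ⟨b, (hmem b).mpr hbs,
            (pv_isParent_iff_reach cl_tree q b).mpr ((pv_anc_mem _ _ _).mp hbanc)⟩
      tauto
    rw [mainLoopA, mainLoopB]
    simp only [hflag]
    exact ih (ex_order ++ [q]) (seenq.add q) _ (by
      intro x
      simp only [List.mem_append, List.mem_singleton, PySem.Set.mem_add]
      exact ⟨fun h => h.imp (hmem x).mp id, fun h => h.imp (hmem x).mpr id⟩)

-- ===== VERDICT (by name: the statement is the Claim_ definition above) =====
theorem check_exception_order_spec : Claim_equal_check_exception_order := by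
  intro cl_tree ex_seq _ hpre
  unfold Spec_check_exception_order
  match ex_seq with
  | [] => exact absurd rfl hpre
  | h :: rest =>
    show mainLoopA _ _ [h] [] rest = mainLoopB _ _ [] rest
    exact pv_mainLoop_eq cl_tree rest [h] (PySem.Set.add PySem.Set.empty h) []
      (by intro x; simp [PySem.Set.empty])
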